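-- pv_equiv track=rewrite | github.com/rafaelGuasselli/exercicios | beecrowd/2875.py | calcularCaminho
-- ===== SOURCE A (Python) =====
-- def getValue(matriz, pos):
-- 	y, x = pos
-- 	if x >= 0 and y >= 0 and y < len(matriz) and x < len(matriz[y]):
-- 		return matriz[y][x]
-- 	return -1
--
-- def acharProximaPosicao(matriz, pos):
-- 	y, x = pos
-- 	queue = [(y-1, x), (y+1, x), (y, x-1), (y, x+1)]
-- 	for posI in queue:
-- 		if getValue(matriz, posI) == "0":
-- 			return posI
-- 	return False
--
-- def calcularCaminho(matriz, pos, caminho, direcao):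
-- 	y, x = pos
-- 	dy, dx = direcao
-- 	matriz[y][x] = "2"
-- 	horizontal = dx != 0
-- 	proximaPos = acharProximaPosicao(matriz, pos)
--
-- 	if proximaPos:
-- 		py, px = proximaPos
-- 		proxDirecao = (py-y, px-x)
-- 		if proxDirecao == direcao:
-- 			caminho += "F "
-- 		elif horizontal:
-- 			if direcao == proxDirecao[::-1]:
-- 				caminho += "R F "
-- 			else:
-- 				caminho += "L F "
-- 		else:
-- 			if direcao == proxDirecao[::-1]:
-- 				caminho += "L F "
-- 			else:
-- 				caminho += "R F "
--
-- 		return calcularCaminho(matriz, proximaPos, caminho, proxDirecao)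
-- 	else:
-- 		return caminho + "E"
-- ===== SOURCE B (Python) =====
-- def getValue(matriz, pos):
-- 	y, x = pos
-- 	if x >= 0 and y >= 0 and y < len(matriz) and x < len(matriz[y]):
-- 		return matriz[y][x]
-- 	return -1
--
-- def acharProximaPosicao(matriz, pos):
-- 	y, x = pos
-- 	queue = [(y-1, x), (y+1, x), (y, x-1), (y, x+1)]
-- 	for posI in queue:
-- 		if getValue(matriz, posI) == "0":
-- 			return posI
-- 	return False
--
-- def _giro(direcao, proxDirecao):
-- 	if proxDirecao == direcao:
-- 		return "F "
-- 	if direcao[1] != 0: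
-- 		return "R F " if direcao == proxDirecao[::-1] else "L F "
-- 	return "L F " if direcao == proxDirecao[::-1] else "R F "
--
-- def calcularCaminho(matriz, pos, caminho, direcao):
-- 	# phase 1: trace the visited cells (same marking order as the original)
-- 	trilha = [pos]
-- 	while True:
-- 		y, x = trilha[-1]
-- 		matriz[y][x] = "2"
-- 		prox = acharProximaPosicao(matriz, trilha[-1])
-- 		if prox is False:
-- 			break
-- 		trilha.append(prox)
-- 	# phase 2: render the token string from consecutive direction pairs
-- 	dirs = [direcao] + [(b[0] - a[0], b[1] - a[1]) for a, b in zip(trilha, trilha[1:])]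
-- 	tokens = [_giro(d, nd) for d, nd in zip(dirs, dirs[1:])]
-- 	return caminho + "".join(tokens) + "E"
-- ===== Notes on version B (the rewrite author's own statement) =====
-- stated objective: alternative
-- what changed: Replaced the recursive accumulate-as-you-go with a two-phase decomposition: an iterative loop first traces the list of visited cells (same mutation order), then the token string is rendered in a second pass from consecutive direction pairs.
import Mathlib
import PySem

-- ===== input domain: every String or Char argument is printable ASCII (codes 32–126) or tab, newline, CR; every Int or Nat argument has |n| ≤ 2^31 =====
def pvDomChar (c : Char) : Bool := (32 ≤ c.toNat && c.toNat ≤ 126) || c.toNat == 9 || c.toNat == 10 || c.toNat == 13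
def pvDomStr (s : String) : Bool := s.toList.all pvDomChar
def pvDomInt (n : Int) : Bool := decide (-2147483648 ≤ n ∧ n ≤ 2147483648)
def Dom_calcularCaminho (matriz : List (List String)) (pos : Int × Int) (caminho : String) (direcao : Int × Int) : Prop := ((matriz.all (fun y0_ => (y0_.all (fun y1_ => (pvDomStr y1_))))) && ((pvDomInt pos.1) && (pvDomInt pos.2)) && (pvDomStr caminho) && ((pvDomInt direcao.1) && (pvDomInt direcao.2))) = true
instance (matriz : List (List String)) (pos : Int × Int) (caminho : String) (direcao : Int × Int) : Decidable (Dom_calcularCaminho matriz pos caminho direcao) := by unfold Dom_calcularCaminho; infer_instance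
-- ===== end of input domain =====

-- B replaces A's recursive accumulate-as-you-go with a two-phase decomposition (trace the
-- visited cells, then render the token string from consecutive direction pairs); objective:
-- alternative. Both A and B mutate matriz in place identically; equivalence here is about the
-- return value (the Lean ports thread the matrix functionally).

-- ===== PORT A =====
-- getValue returns either a grid string or the int -1; ported as Option String (none = -1).
def getValueA (matriz : List (List String)) (pos : Int × Int) : Option String :=
  if 0 ≤ pos.2 ∧ 0 ≤ pos.1 ∧ pos.1 < (matriz.length : Int) ∧
      pos.2 < ((matriz.getD pos.1.toNat []).length : Int)
  then some ((matriz.getD pos.1.toNat []).getD pos.2.toNat "")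
  else none

-- the for-loop over the 4-element queue returning the first hit = List.find?
def acharProximaPosicaoA (matriz : List (List String)) (pos : Int × Int) : Option (Int × Int) :=
  [(pos.1 - 1, pos.2), (pos.1 + 1, pos.2), (pos.1, pos.2 - 1), (pos.1, pos.2 + 1)].find?
    (fun posI => getValueA matriz posI == some "0")

-- matriz[y][x] = "2"; Python wraps a negative index once, exact for indices in [-len, len)
-- (which is exactly what Pre_calcularCaminho guarantees for the initial cell; every later
-- visited cell is in range and non-negative because getValue accepted it).
def setCell2 (matriz : List (List String)) (y x : Int) : List (List String) :=
  matriz.set (if y < 0 then y + (matriz.length : Int) else y).toNat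
    ((matriz.getD (if y < 0 then y + (matriz.length : Int) else y).toNat []).set
      (if x < 0 then x + ((matriz.getD (if y < 0 then y + (matriz.length : Int) else y).toNat []).length : Int) else x).toNat
      "2")

-- fuel bound for the recursion: each recursive call marks one more "0" cell as "2", so the
-- number of "0" cells plus one bounds the number of calls; the fuel-out branch is unreachable
-- on Python's inputs.
def zerosCount (matriz : List (List String)) : Nat :=
  (matriz.map (fun row => row.count "0")).sum

def goA : Nat → List (List String) → (Int × Int) → String → (Int × Int) → String
  | 0, _, _, caminho, _ => caminho ++ "E"
  | fuel + 1, matriz, pos, caminho, direcao =>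
    match acharProximaPosicaoA (setCell2 matriz pos.1 pos.2) pos with
    | some proximaPos =>
        goA fuel (setCell2 matriz pos.1 pos.2) proximaPos
          (if (proximaPos.1 - pos.1, proximaPos.2 - pos.2) = direcao then caminho ++ "F "
           else if direcao.2 ≠ 0 then  -- horizontal
             if direcao = (proximaPos.2 - pos.2, proximaPos.1 - pos.1) then caminho ++ "R F "
             else caminho ++ "L F "
           else
             if direcao = (proximaPos.2 - pos.2, proximaPos.1 - pos.1) then caminho ++ "L F "
             else caminho ++ "R F ")
          (proximaPos.1 - pos.1, proximaPos.2 - pos.2)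
    | none => caminho ++ "E"

def calcularCaminho (matriz : List (List String)) (pos : Int × Int) (caminho : String) (direcao : Int × Int) : String :=
  goA (zerosCount matriz + 1) matriz pos caminho direcao

-- ===== PORT B =====
def giro (direcao proxDirecao : Int × Int) : String :=
  if proxDirecao = direcao then "F "
  else if direcao.2 ≠ 0 then
    if direcao = (proxDirecao.2, proxDirecao.1) then "R F " else "L F "
  else
    if direcao = (proxDirecao.2, proxDirecao.1) then "L F " else "R F "

-- phase 1 of B: the while-loop building `trilha` (same marking order, same fuel as A's bound)
def trilhaB : Nat → List (List String) → (Int × Int) → List (Int × Int)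
  | 0, _, pos => [pos]
  | fuel + 1, matriz, pos =>
    match acharProximaPosicaoA (setCell2 matriz pos.1 pos.2) pos with
    | none => [pos]
    | some prox => pos :: trilhaB fuel (setCell2 matriz pos.1 pos.2) prox

-- phase 2 of B: dirs = [direcao] + deltas of consecutive cells; tokens from consecutive dirs
def calcularCaminho_alt (matriz : List (List String)) (pos : Int × Int) (caminho : String) (direcao : Int × Int) : String :=
  let trilha := trilhaB (zerosCount matriz + 1) matriz pos
  let dirs := direcao :: (trilha.zip trilha.tail).map (fun ab => (ab.2.1 - ab.1.1, ab.2.2 - ab.1.2))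
  caminho ++ String.join ((dirs.zip dirs.tail).map (fun p => giro p.1 p.2)) ++ "E"

-- ===== PRECONDITION & SPEC =====
-- Pre_ excludes exactly the inputs where Python A raises IndexError at `matriz[y][x] = "2"`:
-- the initial position must index the grid (negative indices wrap once, Python-style).
def Pre_calcularCaminho (matriz : List (List String)) (pos : Int × Int) (caminho : String) (direcao : Int × Int) : Prop :=
  -(matriz.length : Int) ≤ pos.1 ∧ pos.1 < (matriz.length : Int) ∧
  -(((matriz.getD (if pos.1 < 0 then pos.1 + (matriz.length : Int) else pos.1).toNat []).length : Int)) ≤ pos.2 ∧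
  pos.2 < ((matriz.getD (if pos.1 < 0 then pos.1 + (matriz.length : Int) else pos.1).toNat []).length : Int)
instance (matriz : List (List String)) (pos : Int × Int) (caminho : String) (direcao : Int × Int) : Decidable (Pre_calcularCaminho matriz pos caminho direcao) := by unfold Pre_calcularCaminho; infer_instance

def pvWitness_calcularCaminho : List (List String) × (Int × Int) × String × (Int × Int) :=
  ([["0", "1"], ["0", "0"]], (0, 0), "", (0, 1))

def Spec_calcularCaminho (matriz : List (List String)) (pos : Int × Int) (caminho : String) (direcao : Int × Int) (out : String) : Prop := out = calcularCaminho_alt matriz pos caminho direcao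
instance (matriz : List (List String)) (pos : Int × Int) (caminho : String) (direcao : Int × Int) (out : String) : Decidable (Spec_calcularCaminho matriz pos caminho direcao out) := by unfold Spec_calcularCaminho; infer_instance

-- ===== CLAIM (what is proved, stated in full; the proofs are below) =====
def Claim_equal_calcularCaminho : Prop := ∀ (matriz : List (List String)) (pos : Int × Int) (caminho : String) (direcao : Int × Int), Dom_calcularCaminho matriz pos caminho direcao → Pre_calcularCaminho matriz pos caminho direcao → Spec_calcularCaminho matriz pos caminho direcao (calcularCaminho matriz pos caminho direcao)

-- ===== LEMMAS AND PROOFS =====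
-- proof-only restatement of B's phase 2, to recurse on the trail
def renderH (caminho : String) (direcao : Int × Int) (trilha : List (Int × Int)) : String :=
  let dirs := direcao :: (trilha.zip trilha.tail).map (fun ab => (ab.2.1 - ab.1.1, ab.2.2 - ab.1.2))
  caminho ++ String.join ((dirs.zip dirs.tail).map (fun p => giro p.1 p.2)) ++ "E"

theorem join_cons (s : String) (l : List String) : String.join (s :: l) = s ++ String.join l := by
  have aux : ∀ (l : List String) (a : String), l.foldl (· ++ ·) a = a ++ l.foldl (· ++ ·) "" := by
    intro l
    induction l with
    | nil => intro a; simp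
    | cons x xs ih =>
        intro a
        simp only [List.foldl_cons]
        rw [ih (a ++ x), ih ("" ++ x)]
        simp [String.append_assoc]
  simp only [String.join, List.foldl_cons]
  rw [aux l ("" ++ s)]
  simp

theorem renderH_nil (c : String) (d : Int × Int) (p : Int × Int) :
    renderH c d [p] = c ++ "E" := by
  simp [renderH, String.join]

theorem renderH_cons (c : String) (d p q : Int × Int) (t : List (Int × Int)) :
    renderH c d (p :: q :: t) =
      renderH (c ++ giro d (q.1 - p.1, q.2 - p.2)) (q.1 - p.1, q.2 - p.2) (q :: t) := by
  simp [renderH, join_cons, String.append_assoc]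

theorem trilhaB_cons (f : Nat) (m : List (List String)) (p : Int × Int) :
    ∃ t, trilhaB f m p = p :: t := by
  cases f with
  | zero => exact ⟨[], rfl⟩
  | succ n =>
      simp only [trilhaB]
      cases acharProximaPosicaoA (setCell2 m p.1 p.2) p with
      | none => exact ⟨[], rfl⟩
      | some q => exact ⟨_, rfl⟩

theorem goA_render (f : Nat) : ∀ (m : List (List String)) (p : Int × Int) (c : String) (d : Int × Int),
    goA f m p c d = renderH c d (trilhaB f m p) := by
  induction f with
  | zero => intro m p c d; simp [goA, trilhaB, renderH_nil]
  | succ n ih =>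
      intro m p c d
      simp only [goA, trilhaB]
      cases h : acharProximaPosicaoA (setCell2 m p.1 p.2) p with
      | none => dsimp only; rw [renderH_nil]
      | some q =>
          obtain ⟨t, ht⟩ := trilhaB_cons n (setCell2 m p.1 p.2) q
          dsimp only
          rw [ih, ht, renderH_cons]
          congr 1
          simp only [giro]
          split_ifs <;> rfl

-- ===== VERDICT (by name: the statement is the Claim_ definition above) =====
theorem calcularCaminho_spec : Claim_equal_calcularCaminho := by
  intro matriz pos caminho direcao _ _
  show calcularCaminho matriz pos caminho direcao = calcularCaminho_alt matriz pos caminho direcao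
  exact goA_render (zerosCount matriz + 1) matriz pos caminho direcao
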